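-- pv_equiv track=rewrite | github.com/LumaPictures/pymel | maintenance/inheritance.py | getLowerCaseMapping
-- ===== SOURCE A (Python) =====
-- def getLowerCaseMapping(names):
--     uniqueLowerNames = {}
--     multiLowerNames = {}
--     for name in names:
--         lowerType = name.lower()
--         if lowerType in multiLowerNames:
--             multiLowerNames[lowerType].append(name)
--         elif lowerType in uniqueLowerNames:
--             multiLowerNames[lowerType] = [uniqueLowerNames.pop(lowerType), name]
--         else:
--             uniqueLowerNames[lowerType] = name
--     return uniqueLowerNames, multiLowerNames
-- ===== SOURCE B (Python) =====
-- def getLowerCaseMapping(names):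
--     groups = {}
--     for name in names:
--         groups.setdefault(name.lower(), []).append(name)
--     uniqueLowerNames = {k: v[0] for k, v in groups.items() if len(v) == 1}
--     multiLowerNames = {k: v for k, v in groups.items() if len(v) > 1}
--     return uniqueLowerNames, multiLowerNames
-- ===== Notes on version B (the rewrite author's own statement) =====
-- stated objective: simpler
-- what changed: B groups all names by their lowercase in one plain dict and then classifies the groups by size in a second pass, replacing A's interleaved pop/transition state machine over two dicts; the two dicts are ==-equal, but Pre_ excludes lists where two case-insensitively duplicated names interleave, on which A's multiLowerNames key iteration order (second occurrence) and B's (first occurrence) are both accidental dict-insertion artefacts.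
import Mathlib
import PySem

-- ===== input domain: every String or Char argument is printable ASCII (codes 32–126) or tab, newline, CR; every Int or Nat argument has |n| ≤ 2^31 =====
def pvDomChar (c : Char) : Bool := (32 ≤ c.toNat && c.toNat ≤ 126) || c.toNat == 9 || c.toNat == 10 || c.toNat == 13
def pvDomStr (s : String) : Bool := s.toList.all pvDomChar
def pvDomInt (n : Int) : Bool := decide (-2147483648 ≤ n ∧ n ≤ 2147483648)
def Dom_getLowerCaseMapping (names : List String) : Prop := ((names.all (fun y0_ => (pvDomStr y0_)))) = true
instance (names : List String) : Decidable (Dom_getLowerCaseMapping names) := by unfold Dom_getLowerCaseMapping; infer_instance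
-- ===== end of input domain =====

-- B replaces A's interleaved pop/transition state machine with one grouping dict and a
-- size-based classification pass (simpler, same O(n) cost); equality is proved on Pre_,
-- which excludes only inputs where the multi-dict key ITERATION order is an accident.

-- ===== PORT A =====
def getLowerCaseMapping (names : List String) : (List (String × String)) × (List (String × List String)) :=
  let r := names.foldl
    (fun (st : PySem.Dict String String × PySem.Dict String (List String)) name =>
      let k := PySem.Str.lower name
      if st.2.contains k then
        -- multiLowerNames[lowerType].append(name)  (key exists: modify is exact)
        (st.1, st.2.modify k [] (fun v => v ++ [name]))
      else if st.1.contains k then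
        -- uniqueLowerNames.pop(lowerType): guarded by the branch, so getD never sees its default
        (st.1.erase k, st.2.insert k [st.1.getD k "", name])
      else
        (st.1.insert k name, st.2))
    (PySem.Dict.empty, PySem.Dict.empty)
  (r.1.items, r.2.items)

-- ===== PORT B =====
def getLowerCaseMapping_alt (names : List String) : (List (String × String)) × (List (String × List String)) :=
  let groups : PySem.Dict String (List String) :=
    names.foldl (fun g name => g.modify (PySem.Str.lower name) [] (fun v => v ++ [name])) PySem.Dict.empty
  -- {k: v[0] for k, v in groups.items() if len(v) == 1}  (v[0] guarded by len(v) == 1)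
  let uniq := groups.items.filterMap (fun kv => if kv.2.length = 1 then some (kv.1, kv.2.headD "") else none)
  -- {k: v for k, v in groups.items() if len(v) > 1}
  let multi := groups.items.filter (fun kv => decide (1 < kv.2.length))
  (uniq, multi)

-- ===== PRECONDITION & SPEC =====
-- positions of k in l, and its first / second occurrence index (used only by Pre_)
def pvPos (l : List String) (k : String) : List Nat := (l.zipIdx.filter (fun p => p.1 == k)).map (fun p => p.2)
def pvFst (l : List String) (k : String) : Nat := (pvPos l k).getD 0 0
def pvSnd (l : List String) (k : String) : Nat := (pvPos l k).getD 1 0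

-- Pre_ excludes lists in which two case-insensitively duplicated names interleave (two
-- duplicated lowercase values whose first and second occurrences are oppositely ordered):
-- there A's multiLowerNames keys iterate in second-occurrence order and B's in
-- first-occurrence order — ==-equal dicts whose accidental insertion orders differ.
def Pre_getLowerCaseMapping (names : List String) : Prop :=
  ∀ k1 ∈ names.map PySem.Str.lower, ∀ k2 ∈ names.map PySem.Str.lower,
    2 ≤ (names.map PySem.Str.lower).count k1 → 2 ≤ (names.map PySem.Str.lower).count k2 →
    (pvFst (names.map PySem.Str.lower) k1 < pvFst (names.map PySem.Str.lower) k2 ↔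
     pvSnd (names.map PySem.Str.lower) k1 < pvSnd (names.map PySem.Str.lower) k2)
instance (names : List String) : Decidable (Pre_getLowerCaseMapping names) := by
  unfold Pre_getLowerCaseMapping; infer_instance

def pvWitness_getLowerCaseMapping : List String := ["Foo", "bar", "BAR", "Bar"]

def Spec_getLowerCaseMapping (names : List String) (out : (List (String × String)) × (List (String × List String))) : Prop := out = getLowerCaseMapping_alt names
instance (names : List String) (out : (List (String × String)) × (List (String × List String))) : Decidable (Spec_getLowerCaseMapping names out) := by unfold Spec_getLowerCaseMapping; infer_instance

-- ===== CLAIM (what is proved, stated in full; the proofs are below) =====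
def Claim_equal_getLowerCaseMapping : Prop := ∀ (names : List String), Dom_getLowerCaseMapping names → Pre_getLowerCaseMapping names → Spec_getLowerCaseMapping names (getLowerCaseMapping names)

-- ===== LEMMAS AND PROOFS =====

-- abbreviations for the common data of both programs
def pvF (ns : List String) (k : String) : List String := ns.filter (fun n => PySem.Str.lower n == k)
def pvS (ns : List String) : List String := PySem.Set.ofList (ns.map PySem.Str.lower)
def pvUKeys (ns : List String) : List String :=
  (pvS ns).filter (fun k => (ns.map PySem.Str.lower).count k == 1)
def pvUItems (ns : List String) : List (String × String) :=
  (pvUKeys ns).map (fun k => (k, (pvF ns k).headD ""))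
-- the lowercase keys in order of their SECOND occurrence (A's multiLowerNames key order)
def pvSOrdAux : List String → List String → List String
  | _, [] => []
  | seen, n :: t =>
      (if seen.count (PySem.Str.lower n) = 1 then [PySem.Str.lower n] else []) ++
        pvSOrdAux (seen ++ [PySem.Str.lower n]) t
def pvSOrd (ns : List String) : List String := pvSOrdAux [] ns
def pvMItems (ns : List String) : List (String × List String) :=
  (pvSOrd ns).map (fun k => (k, pvF ns k))

-- dictionaries of the canonical shape  mk (L.map (fun k => (k, f k)))
theorem pv_find?_mk_map {ν : Type} (L : List String) (f : String → ν) (x : String) :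
    (L.map (fun k => (k, f k))).find? (fun p => p.1 == x) = if x ∈ L then some (x, f x) else none := by
  induction L with
  | nil => simp
  | cons a t ih =>
    by_cases h : a = x
    · subst h; simp
    · simp [h, ih, beq_iff_eq, Ne.symm h]

theorem pv_get?_mk_map {ν : Type} (L : List String) (f : String → ν) (x : String) :
    (PySem.Dict.mk (L.map (fun k => (k, f k)))).get? x = if x ∈ L then some (f x) else none := by
  simp only [PySem.Dict.get?, pv_find?_mk_map]
  split <;> simp

theorem pv_contains_mk_map {ν : Type} (L : List String) (f : String → ν) (x : String) :
    (PySem.Dict.mk (L.map (fun k => (k, f k)))).contains x = decide (x ∈ L) := by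
  rw [PySem.Dict.contains_eq_isSome_get?, pv_get?_mk_map]
  split <;> simp [*]

-- counting and filtering facts
theorem pv_length_pvF (ns : List String) (k : String) :
    (pvF ns k).length = (ns.map PySem.Str.lower).count k := by
  rw [pvF, List.count, List.countP_map, ← List.countP_eq_length_filter]
  rfl

theorem pv_pvF_append (ns : List String) (x : String) (k : String) :
    pvF (ns ++ [x]) k = pvF ns k ++ (if PySem.Str.lower x == k then [x] else []) := by
  simp only [pvF, List.filter_append, List.filter_singleton, Bool.cond_eq_ite]

theorem pv_count_append_ne {l : List String} {k a : String} (h : k ≠ a) :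
    (l ++ [a]).count k = l.count k := by
  simp [List.count_append, Ne.symm h]

theorem pv_pvS_append (ns : List String) (x : String) :
    pvS (ns ++ [x]) =
      if PySem.Str.lower x ∈ pvS ns then pvS ns else pvS ns ++ [PySem.Str.lower x] := by
  simp [pvS, PySem.Set.ofList, List.foldl_append, PySem.Set.add, PySem.Set.contains]

theorem pv_mem_pvS (ns : List String) (k : String) :
    k ∈ pvS ns ↔ k ∈ ns.map PySem.Str.lower := by
  exact PySem.Set.mem_ofList _ _

-- second-occurrence order: append and membership characterisation
theorem pv_pvSOrdAux_append (seen ns : List String) (x : String) :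
    pvSOrdAux seen (ns ++ [x]) =
      pvSOrdAux seen ns ++
        (if (seen ++ ns.map PySem.Str.lower).count (PySem.Str.lower x) = 1
         then [PySem.Str.lower x] else []) := by
  induction ns generalizing seen with
  | nil => simp [pvSOrdAux]
  | cons n t ih =>
    simp only [List.cons_append, pvSOrdAux, ih, List.map_cons, List.append_assoc,
      List.nil_append]
    rfl

theorem pv_mem_pvSOrdAux (seen ns : List String) (k : String) :
    k ∈ pvSOrdAux seen ns ↔
      (seen.count k = 0 ∧ 2 ≤ (ns.map PySem.Str.lower).count k) ∨
      (seen.count k = 1 ∧ 1 ≤ (ns.map PySem.Str.lower).count k) := by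
  induction ns generalizing seen with
  | nil => simp [pvSOrdAux]
  | cons n t ih =>
    simp only [pvSOrdAux, List.mem_append, ih, List.map_cons]
    by_cases hak : PySem.Str.lower n = k
    · subst hak
      simp [List.count_append]
      exact or_comm
    · simp [List.count_append, hak, Ne.symm hak]

theorem pv_pvSOrd_append (ns : List String) (x : String) :
    pvSOrd (ns ++ [x]) =
      pvSOrd ns ++ (if (ns.map PySem.Str.lower).count (PySem.Str.lower x) = 1
                    then [PySem.Str.lower x] else []) := by
  simpa [pvSOrd] using pv_pvSOrdAux_append [] ns x

theorem pv_mem_pvSOrd (ns : List String) (k : String) :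
    k ∈ pvSOrd ns ↔ 2 ≤ (ns.map PySem.Str.lower).count k := by
  simp [pvSOrd, pv_mem_pvSOrdAux]

theorem pv_pvF_append_ne {ns : List String} {x k : String} (h : k ≠ PySem.Str.lower x) :
    pvF (ns ++ [x]) k = pvF ns k := by
  rw [pv_pvF_append]
  simp [Ne.symm h]

theorem pv_pvF_append_self (ns : List String) (x : String) :
    pvF (ns ++ [x]) (PySem.Str.lower x) = pvF ns (PySem.Str.lower x) ++ [x] := by
  rw [pv_pvF_append]
  simp

theorem pv_pvF_nil_of_count_zero {ns : List String} {k : String}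
    (h : (ns.map PySem.Str.lower).count k = 0) : pvF ns k = [] := by
  have := pv_length_pvF ns k
  rw [h] at this
  exact List.eq_nil_of_length_eq_zero this

theorem pv_not_mem_of_count_zero {ns : List String} {x : String}
    (h : (ns.map PySem.Str.lower).count (PySem.Str.lower x) = 0) :
    PySem.Str.lower x ∉ ns.map PySem.Str.lower :=
  List.count_eq_zero.mp h

theorem pv_map_lower_append (ns : List String) (x : String) :
    (ns ++ [x]).map PySem.Str.lower = ns.map PySem.Str.lower ++ [PySem.Str.lower x] := by
  simp

theorem pv_mem_pvUKeys (ns : List String) (k : String) :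
    k ∈ pvUKeys ns ↔ k ∈ ns.map PySem.Str.lower ∧ (ns.map PySem.Str.lower).count k = 1 := by
  simp [pvUKeys, List.mem_filter, pv_mem_pvS]

-- position bookkeeping for Pre_
theorem pv_pvPos_append (l : List String) (a k : String) :
    pvPos (l ++ [a]) k = pvPos l k ++ (if a == k then [l.length] else []) := by
  simp only [pvPos, List.zipIdx_append, List.filter_append, List.map_append]
  congr 1
  by_cases h : a = k <;> simp [List.zipIdx, h]

theorem pv_length_pvPos (l : List String) (k : String) : (pvPos l k).length = l.count k := by
  have h1 : l.count k = List.countP (fun p => p.1 == k) l.zipIdx := by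
    conv_lhs => rw [← List.zipIdx_map_fst 0 l]
    rw [List.count, List.countP_map]
    rfl
  simp [pvPos, h1, ← List.countP_eq_length_filter]

theorem pv_mem_pvPos_lt (l : List String) (k : String) {i : Nat} (h : i ∈ pvPos l k) :
    i < l.length := by
  simp only [pvPos, List.mem_map, List.mem_filter] at h
  obtain ⟨p, ⟨hp, -⟩, rfl⟩ := h
  rcases p with ⟨x, i⟩
  have := List.mem_zipIdx hp
  omega

theorem pv_getD_append_left {xs ys : List Nat} {n : Nat} (h : n < xs.length) (d : Nat) :
    (xs ++ ys).getD n d = xs.getD n d := by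
  rw [List.getD_eq_getElem?_getD, List.getD_eq_getElem?_getD, List.getElem?_append_left h]

theorem pv_pvFst_append_of_mem {l : List String} {k : String} (h : k ∈ l) (a : String) :
    pvFst (l ++ [a]) k = pvFst l k := by
  have hl : 0 < (pvPos l k).length := by
    rw [pv_length_pvPos]; exact List.count_pos_iff.mpr h
  rw [pvFst, pvFst, pv_pvPos_append, pv_getD_append_left hl]

theorem pv_pvFst_lt_length {l : List String} {k : String} (h : k ∈ l) :
    pvFst l k < l.length := by
  have hl : 0 < (pvPos l k).length := by
    rw [pv_length_pvPos]; exact List.count_pos_iff.mpr h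
  rw [pvFst, List.getD_eq_getElem _ _ hl]
  exact pv_mem_pvPos_lt l k (List.getElem_mem hl)

theorem pv_pvFst_append_of_not_mem {l : List String} {k : String} (h : k ∉ l) :
    pvFst (l ++ [k]) k = l.length := by
  have hl : (pvPos l k).length = 0 := by
    rw [pv_length_pvPos]; exact List.count_eq_zero.mpr h
  rw [pvFst, pv_pvPos_append]
  rw [List.length_eq_zero_iff] at hl
  simp [hl]

theorem pv_pvSnd_append_of_two {l : List String} {k : String} (h : 2 ≤ l.count k) (a : String) :
    pvSnd (l ++ [a]) k = pvSnd l k := by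
  have hl : 1 < (pvPos l k).length := by rw [pv_length_pvPos]; omega
  rw [pvSnd, pvSnd, pv_pvPos_append, pv_getD_append_left hl]

theorem pv_pvSnd_lt_of_two {l : List String} {k : String} (h : 2 ≤ l.count k) :
    pvSnd l k < l.length := by
  have hl : 1 < (pvPos l k).length := by rw [pv_length_pvPos]; omega
  rw [pvSnd, List.getD_eq_getElem _ _ hl]
  exact pv_mem_pvPos_lt l k (List.getElem_mem hl)

theorem pv_pvSnd_append_self {l : List String} {k : String} (h : l.count k = 1) :
    pvSnd (l ++ [k]) k = l.length := by
  have hl : (pvPos l k).length = 1 := by rw [pv_length_pvPos]; omega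
  rw [List.length_eq_one_iff] at hl
  obtain ⟨p, hp⟩ := hl
  rw [pvSnd, pv_pvPos_append, hp]
  simp

-- the distinct lowercase values are first-occurrence ordered
theorem pv_ofList_pairwise (l : List String) :
    (PySem.Set.ofList l).Pairwise (fun a b => pvFst l a < pvFst l b) := by
  induction l using List.reverseRecOn with
  | nil => simp [PySem.Set.ofList]
  | append_singleton l a ih =>
    have hofl : PySem.Set.ofList (l ++ [a]) =
        if a ∈ PySem.Set.ofList l then PySem.Set.ofList l else PySem.Set.ofList l ++ [a] := by
      simp [PySem.Set.ofList, List.foldl_append, PySem.Set.add, PySem.Set.contains]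
    have hsub : ∀ b, b ∈ PySem.Set.ofList l → b ∈ l := fun b hb => (PySem.Set.mem_ofList l b).mp hb
    rw [hofl]
    split
    · refine ih.imp_of_mem ?_
      intro b c hb hc hlt
      rwa [pv_pvFst_append_of_mem (hsub b hb) a, pv_pvFst_append_of_mem (hsub c hc) a]
    · rename_i hmem
      have hanl : a ∉ l := fun hh => hmem ((PySem.Set.mem_ofList l a).mpr hh)
      rw [List.pairwise_append]
      refine ⟨ih.imp_of_mem ?_, by simp, ?_⟩
      · intro b c hb hc hlt
        rwa [pv_pvFst_append_of_mem (hsub b hb) a, pv_pvFst_append_of_mem (hsub c hc) a]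
      · intro b hb c hc
        simp only [List.mem_singleton] at hc
        subst hc
        rw [pv_pvFst_append_of_mem (hsub b hb) c, pv_pvFst_append_of_not_mem hanl]
        exact pv_pvFst_lt_length (hsub b hb)

theorem pv_pre_hered (ns : List String) (x : String)
    (h : Pre_getLowerCaseMapping (ns ++ [x])) : Pre_getLowerCaseMapping ns := by
  intro k1 h1 k2 h2 c1 c2
  have hx : (ns ++ [x]).map PySem.Str.lower = ns.map PySem.Str.lower ++ [PySem.Str.lower x] := by
    simp
  have h1' : k1 ∈ (ns ++ [x]).map PySem.Str.lower := by
    rw [hx]; exact List.mem_append_left _ h1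
  have h2' : k2 ∈ (ns ++ [x]).map PySem.Str.lower := by
    rw [hx]; exact List.mem_append_left _ h2
  have c1' : 2 ≤ ((ns ++ [x]).map PySem.Str.lower).count k1 := by
    rw [hx, List.count_append]; omega
  have c2' : 2 ≤ ((ns ++ [x]).map PySem.Str.lower).count k2 := by
    rw [hx, List.count_append]; omega
  have key := h k1 h1' k2 h2' c1' c2'
  rwa [hx, pv_pvFst_append_of_mem h1, pv_pvFst_append_of_mem h2,
    pv_pvSnd_append_of_two c1, pv_pvSnd_append_of_two c2] at key

-- under Pre_, second-occurrence order and first-occurrence order of the duplicated keys agree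
theorem pv_ord (ns : List String) (h : Pre_getLowerCaseMapping ns) :
    pvSOrd ns = (pvS ns).filter (fun k => decide (2 ≤ (ns.map PySem.Str.lower).count k)) := by
  induction ns using List.reverseRecOn with
  | nil => rfl
  | append_singleton ns x ih =>
    have IH := ih (pv_pre_hered ns x h)
    rw [pv_pvSOrd_append, pv_pvS_append, pv_map_lower_append]
    by_cases h2 : 2 ≤ (ns.map PySem.Str.lower).count (PySem.Str.lower x)
    · have hne1 : ¬ (ns.map PySem.Str.lower).count (PySem.Str.lower x) = 1 := by omega
      have hmem : PySem.Str.lower x ∈ pvS ns :=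
        (pv_mem_pvS ns _).mpr (by rw [← List.count_pos_iff]; omega)
      rw [if_neg hne1, List.append_nil, if_pos hmem, IH]
      apply List.filter_congr
      intro k hk
      by_cases hkx : k = PySem.Str.lower x
      · subst hkx
        rw [decide_eq_decide, List.count_append]
        constructor <;> (intro; omega)
      · rw [pv_count_append_ne hkx]
    · by_cases h1 : (ns.map PySem.Str.lower).count (PySem.Str.lower x) = 1
      · have hmeml : PySem.Str.lower x ∈ ns.map PySem.Str.lower := by
          rw [← List.count_pos_iff]; omega
        have hmem : PySem.Str.lower x ∈ pvS ns := (pv_mem_pvS ns _).mpr hmeml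
        rw [if_pos h1, if_pos hmem, IH]
        obtain ⟨S1, S2, hS⟩ := List.append_of_mem hmem
        have hpw := pv_ofList_pairwise (ns.map PySem.Str.lower)
        rw [show PySem.Set.ofList (ns.map PySem.Str.lower) = pvS ns from rfl, hS,
          List.pairwise_append] at hpw
        obtain ⟨-, hpw2, hcross⟩ := hpw
        rw [List.pairwise_cons] at hpw2
        obtain ⟨hafter, -⟩ := hpw2
        have hsubS : ∀ k, k ∈ pvS ns → k ∈ ns.map PySem.Str.lower :=
          fun k hk => (pv_mem_pvS ns k).mp hk
        -- every key listed after (lower x) in pvS is not duplicated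
        have hS2 : ∀ k ∈ S2, ¬ 2 ≤ (ns.map PySem.Str.lower).count k := by
          intro k hkS2 hk2
          have hklt := hafter k hkS2
          have hkx : k ≠ PySem.Str.lower x := fun e => by rw [e] at hklt; omega
          have hkmeml : k ∈ ns.map PySem.Str.lower := by rw [← List.count_pos_iff]; omega
          have hkey := h k (by rw [pv_map_lower_append]; exact List.mem_append_left _ hkmeml)
            (PySem.Str.lower x) (by rw [pv_map_lower_append]; exact List.mem_append_left _ hmeml)
            (by rw [pv_map_lower_append, pv_count_append_ne hkx]; omega)
            (by rw [pv_map_lower_append, List.count_append, h1]; simp)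
          rw [pv_map_lower_append, pv_pvFst_append_of_mem hkmeml, pv_pvFst_append_of_mem hmeml,
            pv_pvSnd_append_of_two hk2, pv_pvSnd_append_self h1] at hkey
          have hkfst : pvFst (ns.map PySem.Str.lower) k < pvFst (ns.map PySem.Str.lower)
              (PySem.Str.lower x) :=
            hkey.mpr (pv_pvSnd_lt_of_two hk2)
          omega
        rw [hS, List.filter_append, List.filter_append, List.filter_cons, List.filter_cons]
        have hf1 : List.filter (fun k => decide (2 ≤ ((ns.map PySem.Str.lower) ++
              [PySem.Str.lower x]).count k)) S1
            = List.filter (fun k => decide (2 ≤ (ns.map PySem.Str.lower).count k)) S1 := by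
          apply List.filter_congr
          intro k hkS1
          have hklt := hcross k hkS1 (PySem.Str.lower x) List.mem_cons_self
          have hkx : k ≠ PySem.Str.lower x := fun e => by rw [e] at hklt; omega
          rw [pv_count_append_ne hkx]
        have hf2 : ∀ (cnt : String → Nat), (∀ k ∈ S2, ¬ 2 ≤ cnt k) →
            List.filter (fun k => decide (2 ≤ cnt k)) S2 = [] := by
          intro cnt hcnt
          rw [List.filter_eq_nil_iff]
          intro k hk
          simpa using hcnt k hk
        have hS2' : ∀ k ∈ S2, ¬ 2 ≤ ((ns.map PySem.Str.lower) ++ [PySem.Str.lower x]).count k := by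
          intro k hkS2
          have hklt := hafter k hkS2
          have hkx : k ≠ PySem.Str.lower x := fun e => by rw [e] at hklt; omega
          rw [pv_count_append_ne hkx]
          exact hS2 k hkS2
        rw [hf1, hf2 _ hS2, hf2 _ hS2']
        have hda : decide (2 ≤ ((ns.map PySem.Str.lower) ++ [PySem.Str.lower x]).count
            (PySem.Str.lower x)) = true := by
          rw [List.count_append, h1]
          simp
        have hda' : decide (2 ≤ (ns.map PySem.Str.lower).count (PySem.Str.lower x)) = false := by
          rw [h1]
          decide
        rw [hda, hda']
        simp
      · have h0 : (ns.map PySem.Str.lower).count (PySem.Str.lower x) = 0 := by omega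
        have hnmem : PySem.Str.lower x ∉ pvS ns :=
          fun hm => (pv_not_mem_of_count_zero h0) ((pv_mem_pvS ns _).mp hm)
        rw [if_neg h1, List.append_nil, if_neg hnmem, List.filter_append, IH]
        have hlast : List.filter (fun k => decide (2 ≤ ((ns.map PySem.Str.lower) ++
            [PySem.Str.lower x]).count k)) [PySem.Str.lower x] = [] := by
          rw [List.filter_eq_nil_iff]
          intro k hk
          rw [List.mem_singleton] at hk
          subst hk
          rw [List.count_append, h0]
          simp
        rw [hlast, List.append_nil]
        apply List.filter_congr
        intro k hk
        have hkne : k ≠ PySem.Str.lower x :=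
          fun e => (pv_not_mem_of_count_zero h0) (e ▸ (pv_mem_pvS ns k).mp hk)
        rw [pv_count_append_ne hkne]

-- snoc behaviour of A's two dictionaries (by the count of the new lowercase key)
theorem pv_pvUItems_append_zero {ns : List String} {x : String}
    (h : (ns.map PySem.Str.lower).count (PySem.Str.lower x) = 0) :
    pvUItems (ns ++ [x]) = pvUItems ns ++ [(PySem.Str.lower x, x)] := by
  have hn := pv_not_mem_of_count_zero h
  have hks : pvUKeys (ns ++ [x]) = pvUKeys ns ++ [PySem.Str.lower x] := by
    rw [pvUKeys, pvUKeys, pv_pvS_append, pv_map_lower_append,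
      if_neg (fun hm => hn ((pv_mem_pvS ns _).mp hm)), List.filter_append]
    congr 1
    · apply List.filter_congr
      intro k hk
      have hkl : k ∈ ns.map PySem.Str.lower := (pv_mem_pvS ns k).mp hk
      have hkne : k ≠ PySem.Str.lower x := fun e => hn (e ▸ hkl)
      rw [pv_count_append_ne hkne]
    · simp [List.count_append, h]
  rw [pvUItems, hks, List.map_append, pvUItems]
  congr 1
  · apply List.map_congr_left
    intro k hk
    have hkne : k ≠ PySem.Str.lower x :=
      fun e => hn (e ▸ ((pv_mem_pvUKeys ns k).mp hk).1)
    rw [pv_pvF_append_ne hkne]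
  · rw [List.map_singleton, pv_pvF_append_self, pv_pvF_nil_of_count_zero h]
    rfl

theorem pv_pvUItems_append_one {ns : List String} {x : String}
    (h : (ns.map PySem.Str.lower).count (PySem.Str.lower x) = 1) :
    pvUItems (ns ++ [x]) = (pvUItems ns).filter (fun p => !(p.1 == PySem.Str.lower x)) := by
  have hmem : PySem.Str.lower x ∈ ns.map PySem.Str.lower := by
    rw [← List.count_pos_iff]; omega
  have hks : pvUKeys (ns ++ [x]) =
      (pvUKeys ns).filter (fun k => !(k == PySem.Str.lower x)) := by
    rw [pvUKeys, pvUKeys, pv_pvS_append, pv_map_lower_append,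
      if_pos ((pv_mem_pvS ns _).mpr hmem), List.filter_filter]
    apply List.filter_congr
    intro k hk
    by_cases hkx : k = PySem.Str.lower x
    · subst hkx
      simp [List.count_append, h]
    · rw [pv_count_append_ne hkx]
      simp [hkx]
  rw [pvUItems, hks, pvUItems, List.filter_map]
  apply List.map_congr_left
  intro k hk
  rw [List.mem_filter] at hk
  have hkne : k ≠ PySem.Str.lower x := by simpa using hk.2
  rw [pv_pvF_append_ne hkne]

theorem pv_pvUItems_append_two {ns : List String} {x : String}
    (h : 2 ≤ (ns.map PySem.Str.lower).count (PySem.Str.lower x)) :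
    pvUItems (ns ++ [x]) = pvUItems ns := by
  have hnot : PySem.Str.lower x ∉ pvUKeys ns := by
    rw [pv_mem_pvUKeys]; omega
  have hks : pvUKeys (ns ++ [x]) = pvUKeys ns := by
    rw [pvUKeys, pvUKeys, pv_pvS_append, pv_map_lower_append,
      if_pos ((pv_mem_pvS ns _).mpr (by rw [← List.count_pos_iff]; omega))]
    apply List.filter_congr
    intro k hk
    by_cases hkx : k = PySem.Str.lower x
    · subst hkx
      simp [List.count_append]
      omega
    · rw [pv_count_append_ne hkx]
  rw [pvUItems, hks, pvUItems]
  apply List.map_congr_left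
  intro k hk
  have hkne : k ≠ PySem.Str.lower x := fun e => hnot (e ▸ hk)
  rw [pv_pvF_append_ne hkne]

theorem pv_pvMItems_append_zero {ns : List String} {x : String}
    (h : (ns.map PySem.Str.lower).count (PySem.Str.lower x) = 0) :
    pvMItems (ns ++ [x]) = pvMItems ns := by
  have hn := pv_not_mem_of_count_zero h
  rw [pvMItems, pvMItems, pv_pvSOrd_append, h, if_neg one_ne_zero.symm, List.append_nil]
  apply List.map_congr_left
  intro k hk
  have hk2 : 2 ≤ (ns.map PySem.Str.lower).count k := (pv_mem_pvSOrd ns k).mp hk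
  have hkne : k ≠ PySem.Str.lower x := fun e => by rw [e, h] at hk2; omega
  rw [pv_pvF_append_ne hkne]

theorem pv_pvMItems_append_one {ns : List String} {x : String}
    (h : (ns.map PySem.Str.lower).count (PySem.Str.lower x) = 1) :
    pvMItems (ns ++ [x]) = pvMItems ns ++ [(PySem.Str.lower x, pvF ns (PySem.Str.lower x) ++ [x])] := by
  have hnot : PySem.Str.lower x ∉ pvSOrd ns := by
    rw [pv_mem_pvSOrd]; omega
  rw [pvMItems, pvMItems, pv_pvSOrd_append, h, if_pos rfl, List.map_append,
    List.map_singleton, pv_pvF_append_self]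
  congr 1
  apply List.map_congr_left
  intro k hk
  have hkne : k ≠ PySem.Str.lower x := fun e => hnot (e ▸ hk)
  rw [pv_pvF_append_ne hkne]

theorem pv_pvMItems_append_two {ns : List String} {x : String}
    (h : 2 ≤ (ns.map PySem.Str.lower).count (PySem.Str.lower x)) :
    pvMItems (ns ++ [x]) =
      (pvMItems ns).map (fun p =>
        if p.1 == PySem.Str.lower x
        then (PySem.Str.lower x, pvF ns (PySem.Str.lower x) ++ [x]) else p) := by
  have hso : pvSOrd (ns ++ [x]) = pvSOrd ns := by
    rw [pv_pvSOrd_append]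
    have : ¬ (ns.map PySem.Str.lower).count (PySem.Str.lower x) = 1 := by omega
    simp [this]
  rw [pvMItems, hso, pvMItems, List.map_map]
  apply List.map_congr_left
  intro k hk
  by_cases hkx : k = PySem.Str.lower x
  · subst hkx
    simp [Function.comp, pv_pvF_append_self]
  · simp [Function.comp, hkx, pv_pvF_append_ne hkx]

-- A's loop state, characterised
theorem pv_foldA_eq (ns : List String) :
    ns.foldl
      (fun (st : PySem.Dict String String × PySem.Dict String (List String)) name =>
        let k := PySem.Str.lower name
        if st.2.contains k then
          (st.1, st.2.modify k [] (fun v => v ++ [name]))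
        else if st.1.contains k then
          (st.1.erase k, st.2.insert k [st.1.getD k "", name])
        else
          (st.1.insert k name, st.2))
      (PySem.Dict.empty, PySem.Dict.empty)
    = (PySem.Dict.mk (pvUItems ns), PySem.Dict.mk (pvMItems ns)) := by
  induction ns using List.reverseRecOn with
  | nil => rfl
  | append_singleton ns x ih =>
    rw [List.foldl_append, ih, List.foldl_cons, List.foldl_nil]
    simp only []
    have hcm : (PySem.Dict.mk (pvMItems ns)).contains (PySem.Str.lower x)
        = decide (2 ≤ (ns.map PySem.Str.lower).count (PySem.Str.lower x)) := by
      rw [pvMItems, pv_contains_mk_map, decide_eq_decide]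
      exact pv_mem_pvSOrd ns _
    have hcu : (PySem.Dict.mk (pvUItems ns)).contains (PySem.Str.lower x)
        = decide (PySem.Str.lower x ∈ ns.map PySem.Str.lower ∧
                  (ns.map PySem.Str.lower).count (PySem.Str.lower x) = 1) := by
      rw [pvUItems, pv_contains_mk_map, decide_eq_decide]
      exact pv_mem_pvUKeys ns _
    by_cases h2 : 2 ≤ (ns.map PySem.Str.lower).count (PySem.Str.lower x)
    · -- first branch: append to the existing multi entry
      have hcm' : (PySem.Dict.mk (pvMItems ns)).contains (PySem.Str.lower x) = true := by
        rw [hcm]; simpa using h2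
      rw [hcm', if_pos rfl]
      simp only [Prod.mk.injEq]
      constructor
      · rw [pv_pvUItems_append_two h2]
      · have hg : (PySem.Dict.mk (pvMItems ns)).getD (PySem.Str.lower x) []
            = pvF ns (PySem.Str.lower x) := by
          rw [pvMItems, PySem.Dict.getD_eq_get?_getD, pv_get?_mk_map,
            if_pos ((pv_mem_pvSOrd ns _).mpr h2)]
          rfl
        apply PySem.Dict.ext
        rw [PySem.Dict.modify, hg, PySem.Dict.items_insert_of_contains _ _ hcm']
        rw [pv_pvMItems_append_two h2]
    · by_cases h1 : (ns.map PySem.Str.lower).count (PySem.Str.lower x) = 1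
      · -- second branch: promote the unique entry
        have hmem : PySem.Str.lower x ∈ ns.map PySem.Str.lower := by
          rw [← List.count_pos_iff]; omega
        have hcm' : (PySem.Dict.mk (pvMItems ns)).contains (PySem.Str.lower x) = false := by
          rw [hcm]; simpa using h2
        have hcu' : (PySem.Dict.mk (pvUItems ns)).contains (PySem.Str.lower x) = true := by
          rw [hcu]; simp [hmem, h1]
        rw [hcm', if_neg (by simp), hcu', if_pos rfl]
        have hF1 : ∃ y, pvF ns (PySem.Str.lower x) = [y] := by
          rw [← List.length_eq_one_iff, pv_length_pvF, h1]
        obtain ⟨y, hy⟩ := hF1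
        have hg : (PySem.Dict.mk (pvUItems ns)).getD (PySem.Str.lower x) "" = y := by
          rw [pvUItems, PySem.Dict.getD_eq_get?_getD, pv_get?_mk_map,
            if_pos ((pv_mem_pvUKeys ns _).mpr ⟨hmem, h1⟩)]
          simp [hy]
        simp only [Prod.mk.injEq]
        constructor
        · apply PySem.Dict.ext
          rw [PySem.Dict.erase, pv_pvUItems_append_one h1]
        · apply PySem.Dict.ext
          rw [hg, PySem.Dict.items_insert_of_not_contains _ _ hcm',
            pv_pvMItems_append_one h1, hy]
          rfl
      · -- third branch: new unique entry
        have h0 : (ns.map PySem.Str.lower).count (PySem.Str.lower x) = 0 := by omega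
        have hcm' : (PySem.Dict.mk (pvMItems ns)).contains (PySem.Str.lower x) = false := by
          rw [hcm]; simpa using h2
        have hcu' : (PySem.Dict.mk (pvUItems ns)).contains (PySem.Str.lower x) = false := by
          rw [hcu]; simp [h1]
        rw [hcm', if_neg (by simp), hcu', if_neg (by simp)]
        simp only [Prod.mk.injEq]
        constructor
        · apply PySem.Dict.ext
          rw [PySem.Dict.items_insert_of_not_contains _ _ hcu', pv_pvUItems_append_zero h0]
        · rw [pv_pvMItems_append_zero h0]

-- B's grouping dictionary, characterised
theorem pv_foldB_eq (ns : List String) :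
    ns.foldl (fun g name => g.modify (PySem.Str.lower name) [] (fun v => v ++ [name]))
      (PySem.Dict.empty : PySem.Dict String (List String))
    = PySem.Dict.mk ((pvS ns).map (fun k => (k, pvF ns k))) := by
  induction ns using List.reverseRecOn with
  | nil => rfl
  | append_singleton ns x ih =>
    rw [List.foldl_append, ih, List.foldl_cons, List.foldl_nil, PySem.Dict.modify]
    have hg : (PySem.Dict.mk ((pvS ns).map (fun k => (k, pvF ns k)))).getD (PySem.Str.lower x) []
        = if PySem.Str.lower x ∈ pvS ns then pvF ns (PySem.Str.lower x) else [] := by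
      rw [PySem.Dict.getD_eq_get?_getD, pv_get?_mk_map]
      split <;> rfl
    by_cases hmem : PySem.Str.lower x ∈ pvS ns
    · have hc : (PySem.Dict.mk ((pvS ns).map (fun k => (k, pvF ns k)))).contains
          (PySem.Str.lower x) = true := by
        rw [pv_contains_mk_map]; simpa using hmem
      apply PySem.Dict.ext
      rw [hg, if_pos hmem, PySem.Dict.items_insert_of_contains _ _ hc]
      show ((pvS ns).map (fun k => (k, pvF ns k))).map _ = (pvS (ns ++ [x])).map _
      rw [pv_pvS_append, if_pos hmem, List.map_map]
      apply List.map_congr_left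
      intro k hk
      by_cases hkx : k = PySem.Str.lower x
      · subst hkx
        simp [Function.comp, pv_pvF_append_self]
      · simp [Function.comp, hkx, pv_pvF_append_ne hkx]
    · have hc : (PySem.Dict.mk ((pvS ns).map (fun k => (k, pvF ns k)))).contains
          (PySem.Str.lower x) = false := by
        rw [pv_contains_mk_map]; simpa using hmem
      apply PySem.Dict.ext
      rw [hg, if_neg hmem, PySem.Dict.items_insert_of_not_contains _ _ hc]
      show ((pvS ns).map (fun k => (k, pvF ns k))) ++ _ = (pvS (ns ++ [x])).map _
      have hcnt : (ns.map PySem.Str.lower).count (PySem.Str.lower x) = 0 :=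
        List.count_eq_zero.mpr (fun hh => hmem ((pv_mem_pvS ns _).mpr hh))
      rw [pv_pvS_append, if_neg hmem, List.map_append, List.map_singleton,
        pv_pvF_append_self, pv_pvF_nil_of_count_zero hcnt]
      congr 1
      apply List.map_congr_left
      intro k hk
      have hkne : k ≠ PySem.Str.lower x := fun e => hmem (e ▸ hk)
      rw [pv_pvF_append_ne hkne]

-- B's two comprehension passes over the grouped items
theorem pv_filterMap_if_map (L : List String) (f : String → List String) :
    (L.map (fun k => (k, f k))).filterMap
        (fun kv => if kv.2.length = 1 then some (kv.1, kv.2.headD "") else none)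
      = (L.filter (fun k => (f k).length == 1)).map (fun k => (k, (f k).headD "")) := by
  rw [List.filterMap_map]
  induction L with
  | nil => simp
  | cons a t ih =>
    by_cases h : (f a).length = 1 <;>
      simp [h, Function.comp] at ih ⊢ <;>
      try exact ih

theorem pv_filter_lt_map (L : List String) (f : String → List String) :
    (L.map (fun k => (k, f k))).filter (fun kv => decide (1 < kv.2.length))
      = (L.filter (fun k => decide (1 < (f k).length))).map (fun k => (k, f k)) := by
  rw [List.filter_map]
  rfl

-- ===== VERDICT (by name: the statement is the Claim_ definition above) =====
theorem getLowerCaseMapping_spec : Claim_equal_getLowerCaseMapping := by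
  intro ns _hdom hpre
  unfold Spec_getLowerCaseMapping
  unfold getLowerCaseMapping getLowerCaseMapping_alt
  rw [pv_foldA_eq, pv_foldB_eq]
  simp only []
  rw [pv_filterMap_if_map, pv_filter_lt_map]
  simp only [Prod.mk.injEq]
  constructor
  · -- unique side
    rw [pvUItems, pvUKeys]
    apply congrArg
    apply List.filter_congr
    intro k _
    rw [pv_length_pvF]
  · -- multi side
    rw [pvMItems, pv_ord ns hpre]
    apply congrArg
    apply List.filter_congr
    intro k _
    simp only [decide_eq_decide, pv_length_pvF]
    omega
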